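-- pv_equiv track=rewrite | github.com/AndyMacDonald/YearlyProblem | yearly_problem.py | groups_from_digits
-- ===== SOURCE A (Python) =====
-- def groups_from_digits(digits):
--   if len(digits) == 1:
--     return [digits]
--
--   last = digits[-1]
--   rest = groups_from_digits(digits[:-1])
--
--   groups = []
--   for g in rest:
--     g1 = g + (last,)
--     groups.append(g1)
--     if g[-1] != 0:
--       g2 = g[:-1] + (g[-1] * 10 + last,)
--       groups.append(g2)
--
--   return groups
-- ===== SOURCE B (Python) =====
-- def _expand(g, d):
--     if g[-1] != 0:
--         return [g + (d,), g[:-1] + (g[-1] * 10 + d,)]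
--     return [g + (d,)]
--
--
-- def groups_from_digits(digits):
--     if len(digits) == 1:
--         return [digits]
--     acc = [digits[:1]]
--     for d in digits[1:]:
--         acc = [h for g in acc for h in _expand(g, d)]
--     return acc
-- ===== Notes on version B (the rewrite author's own statement) =====
-- stated objective: alternative
-- what changed: Replaces the right-to-left recursion (recurse on digits[:-1], then loop appending extensions) with a single left-to-right fold that expands each partial grouping per digit via a helper returning one or two extensions, flattened by a comprehension.
import Mathlib
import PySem

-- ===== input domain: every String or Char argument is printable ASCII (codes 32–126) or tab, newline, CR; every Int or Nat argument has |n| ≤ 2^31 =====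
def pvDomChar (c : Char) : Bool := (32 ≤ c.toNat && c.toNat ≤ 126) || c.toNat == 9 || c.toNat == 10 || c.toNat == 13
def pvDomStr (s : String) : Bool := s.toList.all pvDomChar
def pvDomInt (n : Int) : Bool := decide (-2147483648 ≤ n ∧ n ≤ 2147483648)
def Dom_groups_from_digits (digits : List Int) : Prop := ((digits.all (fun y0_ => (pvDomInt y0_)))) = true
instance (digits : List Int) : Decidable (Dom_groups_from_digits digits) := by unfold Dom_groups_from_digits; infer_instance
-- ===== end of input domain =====

-- B replaces A's right-to-left recursion by a single left-to-right fold that expands each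
-- partial grouping per digit (objective: alternative decomposition, same cost).

-- ===== PORT A =====
-- A: recursion on digits[:-1] (= dropLast, exact), then a loop appending one or two
-- extensions of each group.  the last-element access ported with pyGet? (none = IndexError on [],
-- excluded by Pre_; getD 0 is unreachable there and for g[-1], g being always nonempty).
def groups_from_digits (digits : List Int) : List (List Int) :=
  if digits.length = 1 then [digits]
  else if digits.isEmpty then []   -- Python raises IndexError here (last-element access); outside Pre_
  else
    let last := (PySem.List.pyGet? digits (-1)).getD 0
    let rest := groups_from_digits digits.dropLast
    rest.foldl (fun groups g =>
      let gl := (PySem.List.pyGet? g (-1)).getD 0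
      let groups := groups ++ [g ++ [last]]
      if gl ≠ 0 then groups ++ [g.dropLast ++ [gl * 10 + last]] else groups) []
termination_by digits.length
decreasing_by
  simp only [List.length_dropLast]
  cases digits <;> simp_all

-- ===== PORT B =====
-- helper _expand of Source B (g[-1] via pyGet?; g is never empty on reachable calls)
def pvExpand (g : List Int) (d : Int) : List (List Int) :=
  let gl := (PySem.List.pyGet? g (-1)).getD 0
  if gl ≠ 0 then [g ++ [d], g.dropLast ++ [gl * 10 + d]] else [g ++ [d]]

-- B: fold over digits[1:] starting from [digits[:1]], comprehension = flatMap
def groups_from_digits_alt (digits : List Int) : List (List Int) :=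
  if digits.length = 1 then [digits]
  else (digits.drop 1).foldl (fun acc d => acc.flatMap (fun g => pvExpand g d)) [digits.take 1]

-- ===== PRECONDITION & SPEC =====
-- Pre_ excludes only the empty list, where Python A raises IndexError accessing the last element.
def Pre_groups_from_digits (digits : List Int) : Prop := digits ≠ []
instance (digits : List Int) : Decidable (Pre_groups_from_digits digits) := by unfold Pre_groups_from_digits; infer_instance
def pvWitness_groups_from_digits : List Int := [1, 0, 2]

def Spec_groups_from_digits (digits : List Int) (out : List (List Int)) : Prop := out = groups_from_digits_alt digits
instance (digits : List Int) (out : List (List Int)) : Decidable (Spec_groups_from_digits digits out) := by unfold Spec_groups_from_digits; infer_instance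

-- ===== CLAIM (what is proved, stated in full; the proofs are below) =====
def Claim_equal_groups_from_digits : Prop := ∀ (digits : List Int), Dom_groups_from_digits digits → Pre_groups_from_digits digits → Spec_groups_from_digits digits (groups_from_digits digits)

-- ===== LEMMAS AND PROOFS =====

-- B's fold, without the length-1 shortcut
def pvCore (digits : List Int) : List (List Int) :=
  (digits.drop 1).foldl (fun acc d => acc.flatMap (fun g => pvExpand g d)) [digits.take 1]

lemma pvCore_concat (l : List Int) (x d : Int) :
    pvCore (x :: l ++ [d]) = (pvCore (x :: l)).flatMap (fun g => pvExpand g d) := by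
  simp [pvCore]  -- foldl over l ++ [d] splits off the last step

lemma groups_concat (l : List Int) (x d : Int) :
    groups_from_digits (x :: l ++ [d])
      = (groups_from_digits (x :: l)).flatMap (fun g => pvExpand g d) := by
  rw [groups_from_digits.eq_def]
  have hlen : ¬ (x :: l ++ [d]).length = 1 := by simp
  have hne : ¬ (x :: l ++ [d]).isEmpty := by simp
  simp only [hlen, hne, if_false, PySem.List.pyGet?_neg_one_append_singleton,
    Option.getD_some]
  have hdl : (x :: l ++ [d]).dropLast = x :: l := by
    simpa using List.dropLast_concat (l₁ := x :: l) (b := d)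
  rw [hdl]
  -- the loop body equals "groups ++ pvExpand g d"
  have hfun : (fun (groups : List (List Int)) (g : List Int) =>
        let gl := (PySem.List.pyGet? g (-1)).getD 0
        let groups := groups ++ [g ++ [d]]
        if gl ≠ 0 then groups ++ [g.dropLast ++ [gl * 10 + d]] else groups)
      = fun acc g => acc ++ pvExpand g d := by
    funext acc g
    simp only [pvExpand]
    split <;> simp
  rw [hfun, PySem.List.foldl_append_eq_flatMap]
  simp

lemma groups_eq_core : ∀ (l : List Int) (x : Int),
    groups_from_digits (x :: l) = pvCore (x :: l) := by
  intro l
  induction l using List.reverseRecOn with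
  | nil =>
    intro x
    rw [groups_from_digits.eq_def]
    simp [pvCore]
  | append_singleton l d ih =>
    intro x
    rw [← List.cons_append, groups_concat, pvCore_concat, ih]

-- ===== VERDICT (by name: the statement is the Claim_ definition above) =====
theorem groups_from_digits_spec : Claim_equal_groups_from_digits := by
  intro digits _ hpre
  unfold Spec_groups_from_digits groups_from_digits_alt
  match digits, hpre with
  | x :: l, _ =>
    rw [groups_eq_core l x]
    by_cases h : (x :: l).length = 1
    · have : l = [] := by simpa using h
      subst this
      simp [pvCore]
    · simp only [h, if_false]
      rfl
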